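-- pv_equiv track=rewrite | github.com/danparshall/lobby_analysis | tools/consensus_grouping.py | transitive_closure_clusters
-- ===== SOURCE A (Python) =====
-- def transitive_closure_clusters(
--     pairs_strong: list[tuple[int, int]], n: int
-- ) -> list[list[int]]:
--     """Union-find over strong pairs → list of clusters (sorted-by-min-index)."""
--     parent = list(range(n))
--
--     def find(x: int) -> int:
--         while parent[x] != x:
--             parent[x] = parent[parent[x]]
--             x = parent[x]
--         return x
--
--     def union(x: int, y: int) -> None:
--         rx, ry = find(x), find(y)
--         if rx != ry:
--             parent[rx] = ry
--
--     for i, j in pairs_strong: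
--         union(i, j)
--
--     by_root: dict[int, list[int]] = {}
--     for i in range(n):
--         by_root.setdefault(find(i), []).append(i)
--     clusters = [sorted(members) for members in by_root.values() if len(members) >= 2]
--     clusters.sort(key=lambda c: (-len(c), c[0]))
--     return clusters
-- ===== SOURCE B (Python) =====
-- def transitive_closure_clusters(
--     pairs_strong: list[tuple[int, int]], n: int
-- ) -> list[list[int]]:
--     """Incremental component merging (no union-find): each node carries a
--     component id; a pair joining two components relabels one component and
--     concatenates its member list onto the other."""
--     comp = list(range(n))            # component id of each node
--     members = [[i] for i in range(n)]  # members[c] = nodes currently labelled c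
--     for i, j in pairs_strong:
--         ci, cj = comp[i], comp[j]
--         if ci != cj:
--             for k in members[cj]:
--                 comp[k] = ci
--             members[ci].extend(members[cj])
--             members[cj] = []
--     clusters = [sorted(ms) for ms in members if len(ms) >= 2]
--     clusters.sort(key=lambda c: (-len(c), c[0]))
--     return clusters
-- ===== Notes on version B (the rewrite author's own statement) =====
-- stated objective: alternative
-- what changed: Replaces union-find (parent array, find with path compression, dict grouped by root in a second pass) with direct component merging: every node carries a component id and per-id member lists are concatenated on each merging pair, so the find loops and the grouping pass disappear.
import Mathlib
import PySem

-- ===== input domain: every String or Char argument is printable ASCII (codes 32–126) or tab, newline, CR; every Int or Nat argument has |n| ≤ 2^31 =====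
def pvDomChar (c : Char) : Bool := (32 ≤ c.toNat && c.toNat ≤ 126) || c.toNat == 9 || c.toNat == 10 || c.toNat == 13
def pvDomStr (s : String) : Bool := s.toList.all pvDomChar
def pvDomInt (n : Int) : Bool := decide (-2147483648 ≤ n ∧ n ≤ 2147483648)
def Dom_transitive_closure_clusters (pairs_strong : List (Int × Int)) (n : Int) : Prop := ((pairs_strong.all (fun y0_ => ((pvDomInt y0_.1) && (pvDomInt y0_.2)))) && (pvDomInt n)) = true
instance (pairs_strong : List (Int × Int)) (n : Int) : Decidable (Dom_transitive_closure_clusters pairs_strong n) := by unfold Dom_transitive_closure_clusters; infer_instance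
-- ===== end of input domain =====

-- B replaces A's union-find (find with path compression + dict grouped by root)
-- by direct component merging (component-id array + per-id member lists); same output.

-- ===== PORT A =====
-- find(x): the while-loop with path compression; fuel (parent.length + 1) is a
-- termination guard only — under Pre_ the loop always finishes within it.
def pvFindA : Nat → List Int → Int → Int × List Int
  | 0, parent, x => (x, parent)
  | (fuel+1), parent, x =>
      if PySem.List.pyGetD parent x 0 ≠ x then
        let parent' := PySem.List.pySetD parent x
          (PySem.List.pyGetD parent (PySem.List.pyGetD parent x 0) 0)
        pvFindA fuel parent' (PySem.List.pyGetD parent' x 0)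
      else (x, parent)

def pvUnionA (parent : List Int) (x y : Int) : List Int :=
  let r1 := pvFindA (parent.length + 1) parent x
  let r2 := pvFindA (r1.2.length + 1) r1.2 y
  if r1.1 ≠ r2.1 then PySem.List.pySetD r2.2 r1.1 r2.1 else r2.2

-- sort key (-len(c), c[0]) : Python tuples compare lexicographically
def pvKeyA (c : List Int) : Lex (Int × Int) := toLex (-(c.length : Int), PySem.List.pyGetD c 0 0)

def transitive_closure_clusters (pairs_strong : List (Int × Int)) (n : Int) : List (List Int) :=
  let parent0 := PySem.List.pyRange 0 n 1
  let parent1 := pairs_strong.foldl (fun p ij => pvUnionA p ij.1 ij.2) parent0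
  let st := (PySem.List.pyRange 0 n 1).foldl
      (fun (st : List Int × PySem.Dict Int (List Int)) i =>
        let fr := pvFindA (st.1.length + 1) st.1 i
        (fr.2, st.2.modify fr.1 [] (fun l => l ++ [i])))
      (parent1, PySem.Dict.empty)
  let clusters := (st.2.values.filter (fun ms => 2 ≤ ms.length)).map
      (fun ms => PySem.List.sorted ms (fun x => x) false)
  PySem.List.sorted clusters pvKeyA false

-- ===== PORT B =====
def pvKeyB (c : List Int) : Lex (Int × Int) := toLex (-(c.length : Int), PySem.List.pyGetD c 0 0)

def transitive_closure_clusters_alt (pairs_strong : List (Int × Int)) (n : Int) : List (List Int) :=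
  let st := pairs_strong.foldl
      (fun (st : List Int × List (List Int)) ij =>
        let ci := PySem.List.pyGetD st.1 ij.1 0
        let cj := PySem.List.pyGetD st.1 ij.2 0
        if ci ≠ cj then
          let mj := PySem.List.pyGetD st.2 cj []
          (mj.foldl (fun c k => PySem.List.pySetD c k ci) st.1,
           PySem.List.pySetD (PySem.List.pySetD st.2 ci (PySem.List.pyGetD st.2 ci [] ++ mj)) cj [])
        else st)
      (PySem.List.pyRange 0 n 1, (PySem.List.pyRange 0 n 1).map (fun i => [i]))
  let clusters := (st.2.filter (fun ms => 2 ≤ ms.length)).map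
      (fun ms => PySem.List.sorted ms (fun x => x) false)
  PySem.List.sorted clusters pvKeyB false

-- ===== PRECONDITION & SPEC =====
-- Pre_: every pair index is a valid Python index into the length-n parent list
-- (-n <= i < n); outside this A raises IndexError.
def Pre_transitive_closure_clusters (pairs_strong : List (Int × Int)) (n : Int) : Prop :=
  ∀ p ∈ pairs_strong, -n ≤ p.1 ∧ p.1 < n ∧ -n ≤ p.2 ∧ p.2 < n
instance (pairs_strong : List (Int × Int)) (n : Int) : Decidable (Pre_transitive_closure_clusters pairs_strong n) := by
  unfold Pre_transitive_closure_clusters; infer_instance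
def pvWitness_transitive_closure_clusters : (List (Int × Int)) × Int := ([(0, 1), (1, 2), (4, 3)], 6)
def Spec_transitive_closure_clusters (pairs_strong : List (Int × Int)) (n : Int) (out : List (List Int)) : Prop := out = transitive_closure_clusters_alt pairs_strong n
instance (pairs_strong : List (Int × Int)) (n : Int) (out : List (List Int)) : Decidable (Spec_transitive_closure_clusters pairs_strong n out) := by unfold Spec_transitive_closure_clusters; infer_instance

-- ===== CLAIM (what is proved, stated in full; the proofs are below) =====
def Claim_equal_transitive_closure_clusters : Prop := ∀ (pairs_strong : List (Int × Int)) (n : Int), Dom_transitive_closure_clusters pairs_strong n → Pre_transitive_closure_clusters pairs_strong n → Spec_transitive_closure_clusters pairs_strong n (transitive_closure_clusters pairs_strong n)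

-- ===== LEMMAS AND PROOFS =====

-- Proof-side machinery. m is always n.toNat; nodes are Nats < m.

-- Python index wrap (valid index -n ≤ x < n into a length n.toNat list)
def pvWrap (n x : Int) : Nat := (if x < 0 then x + n else x).toNat

-- step function of a parent/comp array
def pvG (P : List Int) (k : Nat) : Nat := (P.getD k 0).toNat

-- number of non-root nodes
def pvNrc (m : Nat) (P : List Int) : Nat := ((List.range m).filter (fun k => pvG P k ≠ k)).length

-- canonical root: m-fold iteration of the step function
def pvRoot (m : Nat) (P : List Int) (k : Nat) : Nat := (pvG P)^[m] k

-- parent-array invariant: length, ranged values, every node reaches a fixpoint within pvNrc steps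
def pvInv (m : Nat) (P : List Int) : Prop :=
  P.length = m ∧ (∀ k, k < m → P.getD k 0 = (pvG P k : Int) ∧ pvG P k < m) ∧
  (∀ k, k < m → ∃ t, t ≤ pvNrc m P ∧ pvG P ((pvG P)^[t] k) = (pvG P)^[t] k)

theorem pvIdx_int {α : Type} (P : List α) (n x : Int) (hl : P.length = n.toNat)
    (h1 : -n ≤ x) (h2 : x < n) :
    PySem.List.pyIdx? P.length x = some (pvWrap n x) := by
  unfold PySem.List.pyIdx? pvWrap
  rcases lt_or_ge x 0 with hx | hx
  · rw [if_neg (by omega), if_pos (by omega), if_pos hx]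
    congr 1
    omega
  · rw [if_pos hx, if_pos (by omega), if_neg (by omega)]

theorem pvGetD_int {α : Type} (P : List α) (n x : Int) (hl : P.length = n.toNat)
    (h1 : -n ≤ x) (h2 : x < n) (d : α) :
    PySem.List.pyGetD P x d = P.getD (pvWrap n x) d := by
  rw [PySem.List.pyGetD, PySem.List.pyGet?, pvIdx_int P n x hl h1 h2]
  simp [List.getD_eq_getElem?_getD]

theorem pvSetD_int {α : Type} (P : List α) (n x : Int) (hl : P.length = n.toNat)
    (h1 : -n ≤ x) (h2 : x < n) (v : α) :
    PySem.List.pySetD P x v = P.set (pvWrap n x) v := by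
  rw [PySem.List.pySetD, PySem.List.pySet?, pvIdx_int P n x hl h1 h2]
  rfl

-- iterate overshoot: once at a fixpoint, stay there
theorem pvIter_fix {f : Nat → Nat} {k t : Nat} (hfix : f (f^[t] k) = f^[t] k)
    {s : Nat} (hs : t ≤ s) : f^[s] k = f^[t] k := by
  obtain ⟨d, rfl⟩ := Nat.exists_eq_add_of_le hs
  rw [Nat.add_comm, Function.iterate_add_apply]
  exact Function.iterate_fixed hfix d

-- iterates stay below m
theorem pvIter_lt {m : Nat} {P : List Int} (hInv : pvInv m P) {k : Nat} (hk : k < m) (t : Nat) :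
    (pvG P)^[t] k < m := by
  induction t with
  | zero => simpa using hk
  | succ t ih =>
      rw [Function.iterate_succ_apply']
      exact (hInv.2.1 _ ih).2

theorem pvNrc_le (m : Nat) (P : List Int) : pvNrc m P ≤ m := by
  have := List.length_filter_le (fun k => pvG P k ≠ k) (List.range m)
  simpa [pvNrc] using this

-- a root exists, so pvNrc < m (m ≥ 1)
theorem pvNrc_lt {m : Nat} {P : List Int} (hInv : pvInv m P) (hm : 0 < m) : pvNrc m P < m := by
  obtain ⟨t, -, hfix⟩ := hInv.2.2 0 hm
  have hlt : (pvG P)^[t] 0 < m := pvIter_lt hInv hm t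
  have : pvNrc m P < (List.range m).length := by
    unfold pvNrc
    rw [List.length_filter_lt_length_iff_exists]
    exact ⟨(pvG P)^[t] 0, by simpa using hlt, by simpa using hfix⟩
  simpa using this

-- pvRoot is a fixpoint, and absorbs steps
theorem pvRoot_fix {m : Nat} {P : List Int} (hInv : pvInv m P) {k : Nat} (hk : k < m) :
    pvG P (pvRoot m P k) = pvRoot m P k := by
  obtain ⟨t, ht, hfix⟩ := hInv.2.2 k hk
  have : pvRoot m P k = (pvG P)^[t] k :=
    pvIter_fix hfix (le_trans ht (pvNrc_le m P))
  rw [this]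
  exact hfix

theorem pvRoot_eq_iter {m : Nat} {P : List Int} (hInv : pvInv m P) {k : Nat} (hk : k < m)
    {t : Nat} (ht : pvG P ((pvG P)^[t] k) = (pvG P)^[t] k) : pvRoot m P k = (pvG P)^[t] k := by
  rcases le_or_gt t m with h | h
  · exact pvIter_fix ht h
  · have h1 : (pvG P)^[t] k = (pvG P)^[m] k := pvIter_fix (pvRoot_fix hInv hk) (le_of_lt h)
    rw [h1]
    rfl

theorem pvRoot_step {m : Nat} {P : List Int} (hInv : pvInv m P) {k : Nat} (hk : k < m) :
    pvRoot m P (pvG P k) = pvRoot m P k := by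
  have h1 : (pvG P)^[m] (pvG P k) = (pvG P)^[m + 1] k := by
    rw [Function.iterate_succ_apply]
  have h2 : (pvG P)^[m + 1] k = (pvG P)^[m] k := by
    rw [Function.iterate_succ_apply']
    exact pvRoot_fix hInv hk
  unfold pvRoot
  rw [h1, h2]

theorem pvRoot_lt {m : Nat} {P : List Int} (hInv : pvInv m P) {k : Nat} (hk : k < m) :
    pvRoot m P k < m := pvIter_lt hInv hk m

-- no node with pvG w ≠ w has pvG (pvG w) = w (no 2-cycles), under the invariant
theorem pvNoTwoCycle {m : Nat} {P : List Int} (hInv : pvInv m P) {w : Nat} (hw : w < m)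
    (hne : pvG P w ≠ w) : pvG P (pvG P w) ≠ w := by
  intro hcyc
  obtain ⟨t, -, hfix⟩ := hInv.2.2 w hw
  have h2w : (pvG P)^[2] w = w := by
    simp [Function.iterate_succ_apply, hcyc]
  have hper : ∀ s, (pvG P)^[2 * s] w = w := by
    intro s
    induction s with
    | zero => rfl
    | succ s ih =>
        have h1 : 2 * (s + 1) = 2 * s + 2 := by ring
        rw [h1, Function.iterate_add_apply, h2w, ih]
  have heven : ∀ s, (pvG P)^[s] w = w ∨ (pvG P)^[s] w = pvG P w := by
    intro s
    rcases Nat.even_or_odd s with ⟨c, hc⟩ | ⟨c, hc⟩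
    · left
      have h1 : s = 2 * c := by omega
      rw [h1, hper]
    · right
      have h1 : s = 2 * c + 1 := by omega
      rw [h1, Nat.add_comm, Function.iterate_add_apply, Function.iterate_one, hper]
  rcases heven t with h | h
  · rw [h] at hfix
    exact hne hfix
  · rw [h] at hfix
    exact hne (by rw [← hfix, hcyc])

-- getD after set
theorem pvGetD_set {α : Type} (l : List α) (i j : Nat) (a d : α) (h : i < l.length) :
    (l.set i a).getD j d = if j = i then a else l.getD j d := by
  rw [List.getD_eq_getElem?_getD, List.getD_eq_getElem?_getD, List.getElem?_set]
  rcases eq_or_ne i j with rfl | hne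
  · simp [h]
  · simp [hne, Ne.symm hne]

theorem pvG_set (P : List Int) (w : Nat) (hw : w < P.length) (v : Int) (k : Nat) :
    pvG (P.set w v) k = if k = w then v.toNat else pvG P k := by
  unfold pvG
  rw [pvGetD_set P w k v 0 hw]
  split <;> rfl

-- path compression core: each reachability certificate survives the set, with no longer a path
theorem pvCompressCore {m : Nat} {P : List Int} (hInv : pvInv m P) {w : Nat} (hw : w < m)
    (hne : pvG P w ≠ w) :
    ∀ t k, k < m → pvG P ((pvG P)^[t] k) = (pvG P)^[t] k →
      ∃ t' ≤ t, (pvG (P.set w (P.getD (pvG P w) 0)))^[t'] k = (pvG P)^[t] k ∧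
        pvG (P.set w (P.getD (pvG P w) 0)) ((pvG (P.set w (P.getD (pvG P w) 0)))^[t'] k)
          = (pvG (P.set w (P.getD (pvG P w) 0)))^[t'] k := by
  have hlen : P.length = m := hInv.1
  set P' := P.set w (P.getD (pvG P w) 0) with hP'
  have hgw : pvG P' w = pvG P (pvG P w) := by
    rw [pvG_set P w (by omega) _ w, if_pos rfl]
    rfl
  have hother : ∀ k, k ≠ w → pvG P' k = pvG P k := by
    intro k hk
    rw [pvG_set P w (by omega) _ k, if_neg hk]
  intro t
  induction t using Nat.strong_induction_on with
  | _ t ih =>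
    intro k hk hfix
    by_cases hroot : pvG P k = k
    · have hkw : k ≠ w := fun h => hne (h ▸ hroot)
      refine ⟨0, Nat.zero_le t, ?_, ?_⟩
      · simp [Function.iterate_fixed hroot t]
      · simpa using (hother k hkw).trans hroot
    · rcases t with _ | s
      · exact absurd hfix hroot
      · by_cases hkw : k = w
        · subst k
          by_cases hgfix : pvG P (pvG P w) = pvG P w
          · refine ⟨1, by omega, ?_, ?_⟩
            · have hval : (pvG P)^[s+1] w = pvG P w := by
                rw [Function.iterate_succ_apply]
                exact Function.iterate_fixed hgfix s
              rw [hval]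
              simpa using hgw.trans hgfix
            · have h1 : (pvG P')^[1] w = pvG P w := by simpa using hgw.trans hgfix
              rw [h1, hother _ hne, hgfix]
          · rcases s with _ | u
            · rw [Function.iterate_one] at hfix
              exact absurd hfix hgfix
            · have hfix2 : pvG P ((pvG P)^[u] (pvG P (pvG P w))) = (pvG P)^[u] (pvG P (pvG P w)) := by
                have : (pvG P)^[u+2] w = (pvG P)^[u] (pvG P (pvG P w)) := by
                  rw [Function.iterate_add_apply (pvG P) u 2]
                  rfl
                rw [← this]
                exact hfix
              have hggw : pvG P (pvG P w) < m := (hInv.2.1 _ (hInv.2.1 _ hw).2).2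
              obtain ⟨t', ht', hval, hfix'⟩ := ih u (by omega) (pvG P (pvG P w)) hggw hfix2
              refine ⟨t' + 1, by omega, ?_, ?_⟩
              · have h1 : (pvG P')^[t'+1] w = (pvG P')^[t'] (pvG P (pvG P w)) := by
                  rw [Function.iterate_succ_apply, hgw]
                rw [h1, hval, Function.iterate_add_apply (pvG P) u 2]
                rfl
              · have h1 : (pvG P')^[t'+1] w = (pvG P')^[t'] (pvG P (pvG P w)) := by
                  rw [Function.iterate_succ_apply, hgw]
                rw [h1]
                exact hfix'
        · have hfix1 : pvG P ((pvG P)^[s] (pvG P k)) = (pvG P)^[s] (pvG P k) := by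
            rw [← Function.iterate_succ_apply]
            exact hfix
          obtain ⟨t', ht', hval, hfix'⟩ := ih s (by omega) (pvG P k) (hInv.2.1 _ hk).2 hfix1
          refine ⟨t' + 1, by omega, ?_, ?_⟩
          · rw [Function.iterate_succ_apply, hother k hkw, hval, Function.iterate_succ_apply]
          · rw [Function.iterate_succ_apply, hother k hkw]
            exact hfix'

theorem pvCompress {m : Nat} {P : List Int} (hInv : pvInv m P) {w : Nat} (hw : w < m)
    (hne : pvG P w ≠ w) :
    pvInv m (P.set w (P.getD (pvG P w) 0)) ∧
    (∀ k, k < m → pvRoot m (P.set w (P.getD (pvG P w) 0)) k = pvRoot m P k) ∧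
    pvNrc m (P.set w (P.getD (pvG P w) 0)) = pvNrc m P := by
  have hlen : P.length = m := hInv.1
  set P' := P.set w (P.getD (pvG P w) 0) with hP'
  have hgw : pvG P' w = pvG P (pvG P w) := by
    rw [pvG_set P w (by omega) _ w, if_pos rfl]
    rfl
  have hother : ∀ k, k ≠ w → pvG P' k = pvG P k := by
    intro k hk
    rw [pvG_set P w (by omega) _ k, if_neg hk]
  have hnrc : pvNrc m P' = pvNrc m P := by
    unfold pvNrc
    congr 1
    apply List.filter_congr
    intro k hkmem
    rcases eq_or_ne k w with rfl | hkw
    · simp [hgw, hne, pvNoTwoCycle hInv hw hne]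
    · simp [hother k hkw]
  have hlen' : P'.length = m := by
    rw [hP', List.length_set, hlen]
  have hval' : ∀ k, k < m → P'.getD k 0 = (pvG P' k : Int) ∧ pvG P' k < m := by
    intro k hk
    rcases eq_or_ne k w with hkw | hkw
    · constructor
      · rw [hP', pvGetD_set P w k _ 0 (by omega), if_pos hkw, hkw, hgw]
        exact (hInv.2.1 _ (hInv.2.1 _ hw).2).1
      · rw [hkw, hgw]
        exact (hInv.2.1 _ (hInv.2.1 _ hw).2).2
    · constructor
      · rw [hP', pvGetD_set P w k _ 0 (by omega), if_neg hkw, hother k hkw]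
        exact (hInv.2.1 _ hk).1
      · rw [hother k hkw]
        exact (hInv.2.1 _ hk).2
  have hInv' : pvInv m P' := by
    refine ⟨hlen', hval', ?_⟩
    intro k hk
    obtain ⟨t, ht, hfix⟩ := hInv.2.2 k hk
    obtain ⟨t', ht', hval, hfix'⟩ := pvCompressCore hInv hw hne t k hk hfix
    exact ⟨t', by omega, hfix'⟩
  refine ⟨hInv', ?_, hnrc⟩
  intro k hk
  obtain ⟨t, ht, hfix⟩ := hInv.2.2 k hk
  obtain ⟨t', ht', hval, hfix'⟩ := pvCompressCore hInv hw hne t k hk hfix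
  rw [pvRoot_eq_iter hInv' hk hfix', hval, ← pvRoot_eq_iter hInv hk hfix]

-- convenience wrappers with length m
theorem pvGetD_m {m : Nat} (P : List Int) (hl : P.length = m) {x : Int}
    (h1 : -(m : Int) ≤ x) (h2 : x < m) (d : Int) :
    PySem.List.pyGetD P x d = P.getD (pvWrap m x) d := by
  exact pvGetD_int P m x (by omega) h1 h2 d

theorem pvSetD_m {m : Nat} (P : List Int) (hl : P.length = m) {x : Int}
    (h1 : -(m : Int) ≤ x) (h2 : x < m) (v : Int) :
    PySem.List.pySetD P x v = P.set (pvWrap m x) v := by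
  exact pvSetD_int P m x (by omega) h1 h2 v

theorem pvWrap_cast (m w : Nat) : pvWrap m (w : Int) = w := by
  unfold pvWrap
  rw [if_neg (by omega)]
  omega

theorem pvWrap_lt' {m : Nat} {x : Int} (h1 : -(m : Int) ≤ x) (h2 : x < m) : pvWrap m x < m := by
  unfold pvWrap; split <;> omega

-- find, generalized over the fixpoint-time certificate and the fuel
theorem pvFindA_go {m : Nat} : ∀ t (P : List Int) (x : Int) (fuel : Nat), pvInv m P →
    -(m : Int) ≤ x → x < m →
    pvG P ((pvG P)^[t] (pvWrap m x)) = (pvG P)^[t] (pvWrap m x) →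
    t < fuel → (x < 0 → t + 1 < fuel) →
    ∃ P', pvFindA fuel P x = ((pvRoot m P (pvWrap m x) : Int), P') ∧ pvInv m P' ∧
      (∀ k, k < m → pvRoot m P' k = pvRoot m P k) := by
  intro t
  induction t using Nat.strong_induction_on with
  | _ t ih =>
    intro P x fuel hInv h1 h2 hfix hf1 hf2
    have hlen : P.length = m := hInv.1
    set w := pvWrap m x with hw
    have hwm : w < m := pvWrap_lt' h1 h2
    have hPw : P.getD w 0 = (pvG P w : Int) := (hInv.2.1 w hwm).1
    rcases fuel with _ | fuel
    · omega
    by_cases hroot : pvG P w = w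
    · -- w is already a root
      have hRw : pvRoot m P w = w := by
        have := pvRoot_eq_iter hInv hwm (t := 0) (by simpa using hroot)
        simpa using this
      rcases lt_or_ge x 0 with hx | hx
      · -- negative index: one no-op compression iteration, then done
        have hcond : PySem.List.pyGetD P x 0 ≠ x := by
          rw [pvGetD_m P hlen h1 h2, hPw]
          omega
        have hget : PySem.List.pyGetD P x 0 = (w : Int) := by
          rw [pvGetD_m P hlen h1 h2, hPw, hroot]
        have hgetw : PySem.List.pyGetD P ((w : Int)) 0 = (w : Int) := by
          rw [PySem.List.pyGetD_natCast, hPw, hroot]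
        have hset : PySem.List.pySetD P x ((w : Int)) = P := by
          rw [pvSetD_m P hlen h1 h2, ← hw]
          have hv : ((w : Nat) : Int) = P.getD w 0 := by rw [hPw, hroot]
          rw [hv, List.getD_eq_getElem?_getD, List.getElem?_eq_getElem (by omega)]
          simp
        rcases fuel with _ | fuel
        · omega
        refine ⟨P, ?_, hInv, fun k _ => rfl⟩
        rw [pvFindA, if_pos hcond, hget, hgetw, hset]
        show pvFindA (fuel + 1) P (PySem.List.pyGetD P x 0) = ((pvRoot m P (pvWrap m x) : Int), P)
        rw [hget, ← hw, pvFindA, if_neg (by rw [hgetw]; exact fun h => h rfl), hRw]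
      · -- nonnegative index: loop condition is false at once
        have hxw : x = (w : Int) := by
          rw [hw]
          unfold pvWrap
          rw [if_neg (by omega)]
          omega
        refine ⟨P, ?_, hInv, fun k _ => rfl⟩
        rw [pvFindA, if_neg (by rw [pvGetD_m P hlen h1 h2, hPw, hroot, hxw]; exact fun h => h rfl)]
        rw [hxw, hRw]
    · -- w is not a root: one compression step, then recurse at the grandparent
      have hgwm : pvG P w < m := (hInv.2.1 w hwm).2
      have hPgw : P.getD (pvG P w) 0 = (pvG P (pvG P w) : Int) := (hInv.2.1 _ hgwm).1
      have hggwm : pvG P (pvG P w) < m := (hInv.2.1 _ hgwm).2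
      have hcond : PySem.List.pyGetD P x 0 ≠ x := by
        rw [pvGetD_m P hlen h1 h2, hPw]
        rcases lt_or_ge x 0 with hx | hx
        · omega
        · intro hcontra
          apply hroot
          have : x = (w : Int) := by
            rw [hw]; unfold pvWrap; rw [if_neg (by omega)]; omega
          rw [this] at hcontra
          exact_mod_cast hcontra
      have hget : PySem.List.pyGetD P x 0 = ((pvG P w : Nat) : Int) := by
        rw [pvGetD_m P hlen h1 h2, hPw]
      have hget2 : PySem.List.pyGetD P ((pvG P w : Nat) : Int) 0 = P.getD (pvG P w) 0 := by
        rw [PySem.List.pyGetD_natCast]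
      have hset : PySem.List.pySetD P x (P.getD (pvG P w) 0) = P.set w (P.getD (pvG P w) 0) := by
        rw [pvSetD_m P hlen h1 h2]
      obtain ⟨hInv', hroot', hnrc'⟩ := pvCompress hInv hwm hroot
      set P' := P.set w (P.getD (pvG P w) 0) with hP'
      have hlen' : P'.length = m := hInv'.1
      have hgetP' : PySem.List.pyGetD P' x 0 = ((pvG P (pvG P w) : Nat) : Int) := by
        rw [pvGetD_m P' hlen' h1 h2, ← hw, hP', pvGetD_set P w w _ 0 (by omega), if_pos rfl, hPgw]
      -- fixpoint certificate for the grandparent in P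
      have hcert : ∃ s, s < t ∧ s + 1 < fuel + 1 ∧
          pvG P ((pvG P)^[s] (pvG P (pvG P w))) = (pvG P)^[s] (pvG P (pvG P w)) := by
        rcases t with _ | t'
        · exact absurd (by simpa using hfix) hroot
        rcases t' with _ | t''
        · refine ⟨0, by omega, by omega, ?_⟩
          rw [Function.iterate_one] at hfix
          simp [hfix]
        · refine ⟨t'', by omega, by omega, ?_⟩
          have hsh : (pvG P)^[t''] (pvG P (pvG P w)) = (pvG P)^[t'' + 2] w := by
            rw [Function.iterate_add_apply (pvG P) t'' 2]
            rfl
          rw [hsh]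
          exact hfix
      obtain ⟨s, hst, hsf, hsfix⟩ := hcert
      obtain ⟨s', hs', hval', hfix'⟩ := pvCompressCore hInv hwm hroot s _ hggwm hsfix
      -- recurse
      have hx'1 : -(m : Int) ≤ ((pvG P (pvG P w) : Nat) : Int) := by omega
      have hx'2 : ((pvG P (pvG P w) : Nat) : Int) < m := by exact_mod_cast hggwm
      have hwx' : pvWrap m ((pvG P (pvG P w) : Nat) : Int) = pvG P (pvG P w) := pvWrap_cast _ _
      obtain ⟨P'', hrec, hInv'', hroot''⟩ :=
        ih s' (by omega) P' ((pvG P (pvG P w) : Nat) : Int) fuel hInv' hx'1 hx'2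
          (by rw [hwx']; exact hfix') (by omega) (by omega)
      refine ⟨P'', ?_, hInv'', ?_⟩
      · rw [pvFindA, if_pos hcond, hget, hget2, hset]
        show pvFindA fuel P' (PySem.List.pyGetD P' x 0) = ((pvRoot m P (pvWrap m x) : Int), P'')
        rw [hgetP', hrec, hwx', ← hw]
        congr 2
        rw [hroot' _ hggwm, pvRoot_step hInv hgwm, pvRoot_step hInv hwm]
      · intro k hk
        rw [hroot'' k hk, hroot' k hk]

theorem pvFindA_spec {m : Nat} {P : List Int} (hInv : pvInv m P) {x : Int}
    (h1 : -(m : Int) ≤ x) (h2 : x < m) :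
    ∃ P', pvFindA (m + 1) P x = ((pvRoot m P (pvWrap m x) : Int), P') ∧ pvInv m P' ∧
      (∀ k, k < m → pvRoot m P' k = pvRoot m P k) := by
  have hwm : pvWrap m x < m := pvWrap_lt' h1 h2
  obtain ⟨t, ht, hfix⟩ := hInv.2.2 _ hwm
  have hm : 0 < m := by omega
  have hnrc := pvNrc_lt hInv hm
  exact pvFindA_go t P x (m + 1) hInv h1 h2 hfix (by omega) (fun _ => by omega)

-- a strict count inequality for filters
theorem pvCountP_lt {α : Type} {l : List α} {p q : α → Bool}
    (hmono : ∀ x ∈ l, p x → q x) {x : α} (hx : x ∈ l) (hpx : ¬ p x) (hqx : q x) :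
    l.countP p < l.countP q := by
  induction l with
  | nil => cases hx
  | cons a l ih =>
      rcases List.mem_cons.1 hx with rfl | hx'
      · rw [List.countP_cons, List.countP_cons, if_neg (by simpa using hpx), if_pos hqx]
        have : l.countP p ≤ l.countP q :=
          List.countP_mono_left (fun x hxl => hmono x (List.mem_cons_of_mem _ hxl))
        omega
      · have h1 := ih (fun y hy => hmono y (List.mem_cons_of_mem _ hy)) hx'
        rw [List.countP_cons, List.countP_cons]
        have : (if p a then 1 else 0) ≤ (if q a then 1 else 0) := by
          by_cases hpa : p a
          · rw [if_pos hpa, if_pos (hmono a List.mem_cons_self hpa)]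
          · rw [if_neg hpa]
            split <;> omega
        omega

theorem pvRoot_iter {m : Nat} {P : List Int} (hInv : pvInv m P) {k : Nat} (hk : k < m) (i : Nat) :
    pvRoot m P ((pvG P)^[i] k) = pvRoot m P k := by
  induction i with
  | zero => rfl
  | succ i ih =>
      rw [Function.iterate_succ_apply', pvRoot_step hInv (pvIter_lt hInv hk i), ih]

theorem pvRoot_root {m : Nat} {P : List Int} (hInv : pvInv m P) {k : Nat} (hk : k < m) :
    pvRoot m P (pvRoot m P k) = pvRoot m P k := pvRoot_iter hInv hk m

theorem pvG_root {m : Nat} {P : List Int} (hInv : pvInv m P) {r : Nat} (hr : r < m)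
    (h : pvRoot m P r = r) : pvG P r = r := by
  conv_lhs => rw [← h]
  rw [pvRoot_fix hInv hr, h]

-- link: setting a root rx to point at another root ry
theorem pvLink {m : Nat} {P : List Int} (hInv : pvInv m P) {rx ry : Nat}
    (hrx : rx < m) (hry : ry < m) (hfx : pvG P rx = rx) (hfy : pvG P ry = ry) (hne : rx ≠ ry) :
    pvInv m (P.set rx (ry : Int)) ∧
    (∀ k, k < m → pvRoot m (P.set rx (ry : Int)) k =
      (if pvRoot m P k = rx then ry else pvRoot m P k)) := by
  have hlen : P.length = m := hInv.1
  set P' := P.set rx (ry : Int) with hP'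
  have hgrx : pvG P' rx = ry := by
    rw [pvG_set P rx (by omega) _ rx, if_pos rfl]
    omega
  have hother : ∀ k, k ≠ rx → pvG P' k = pvG P k := by
    intro k hk
    rw [pvG_set P rx (by omega) _ k, if_neg hk]
  have hry' : pvG P' ry = ry := by rw [hother ry hne.symm, hfy]
  -- the orbit in P' tracks the orbit in P until it hits rx, then jumps to ry and stays
  have claim : ∀ k, k < m → ∀ s, (pvG P')^[s] k = (pvG P)^[s] k ∨
      ((pvG P')^[s] k = ry ∧ pvRoot m P k = rx) := by
    intro k hk s
    induction s with
    | zero => left; rfl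
    | succ s ihs =>
        rcases ihs with hl | ⟨hr, hroot⟩
        · by_cases hhit : (pvG P)^[s] k = rx
          · right
            constructor
            · rw [Function.iterate_succ_apply', hl, hhit, hgrx]
            · rw [← pvRoot_iter hInv hk s, hhit]
              have h0 := pvRoot_eq_iter hInv hrx (t := 0) (by simpa using hfx)
              simpa using h0
          · left
            rw [Function.iterate_succ_apply', Function.iterate_succ_apply', hl, hother _ hhit]
        · right
          refine ⟨?_, hroot⟩
          rw [Function.iterate_succ_apply', hr, hry']
  have hval' : ∀ k, k < m → P'.getD k 0 = (pvG P' k : Int) ∧ pvG P' k < m := by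
    intro k hk
    rcases eq_or_ne k rx with hkw | hkw
    · constructor
      · rw [hP', pvGetD_set P rx k _ 0 (by omega), if_pos hkw, hkw, hgrx]
      · rw [hkw, hgrx]; exact hry
    · constructor
      · rw [hP', pvGetD_set P rx k _ 0 (by omega), if_neg hkw, hother k hkw]
        exact (hInv.2.1 _ hk).1
      · rw [hother k hkw]; exact (hInv.2.1 _ hk).2
  have hnrc : pvNrc m P < pvNrc m P' := by
    unfold pvNrc
    rw [← List.countP_eq_length_filter, ← List.countP_eq_length_filter]
    refine pvCountP_lt ?_ (x := rx) (by simpa using hrx) ?_ ?_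
    · intro z hz hpz
      rcases eq_or_ne z rx with rfl | hzrx
      · simp [hgrx, hne.symm]
      · simpa [hother z hzrx] using hpz
    · simp [hfx]
    · simp [hgrx, hne.symm]
  -- every node reaches a P'-fixpoint in one extra step
  have hreach : ∀ k, k < m → ∃ t, t ≤ pvNrc m P + 1 ∧
      pvG P' ((pvG P')^[t] k) = (pvG P')^[t] k := by
    intro k hk
    obtain ⟨t, ht, hfixt⟩ := hInv.2.2 k hk
    refine ⟨t + 1, by omega, ?_⟩
    rcases claim k hk t with hl | ⟨hr, -⟩
    · by_cases hhit : (pvG P)^[t] k = rx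
      · have h1 : (pvG P')^[t+1] k = ry := by
          rw [Function.iterate_succ_apply', hl, hhit, hgrx]
        rw [h1, hry']
      · have h1 : (pvG P')^[t+1] k = (pvG P)^[t] k := by
          rw [Function.iterate_succ_apply', hl, hother _ hhit, hfixt]
        rw [h1, hother _ hhit, hfixt]
    · have h1 : (pvG P')^[t+1] k = ry := by
        rw [Function.iterate_succ_apply', hr, hry']
      rw [h1, hry']
  have hInv' : pvInv m P' := by
    refine ⟨by rw [hP', List.length_set, hlen], hval', ?_⟩
    intro k hk
    obtain ⟨t, ht, hfixt⟩ := hreach k hk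
    exact ⟨t, by omega, hfixt⟩
  refine ⟨hInv', ?_⟩
  intro k hk
  obtain ⟨t, ht, hfixt⟩ := hInv.2.2 k hk
  have hrk : pvRoot m P k = (pvG P)^[t] k := pvRoot_eq_iter hInv hk hfixt
  by_cases hcase : pvRoot m P k = rx
  · rw [if_pos hcase]
    have h1 : (pvG P')^[t+1] k = ry := by
      rcases claim k hk t with hl | ⟨hr, -⟩
      · rw [Function.iterate_succ_apply', hl, ← hrk, hcase, hgrx]
      · rw [Function.iterate_succ_apply', hr, hry']
    rw [pvRoot_eq_iter hInv' hk (t := t + 1) (by rw [h1, hry']), h1]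
  · rw [if_neg hcase]
    rcases claim k hk t with hl | ⟨-, hroot⟩
    · have h1 : (pvG P')^[t] k = (pvG P)^[t] k := hl
      have hfix2 : pvG P' ((pvG P')^[t] k) = (pvG P')^[t] k := by
        rw [h1, hother _ (by rw [← hrk]; exact hcase), hfixt]
      rw [pvRoot_eq_iter hInv' hk hfix2, h1, hrk]
    · exact absurd hroot hcase

-- union: full specification
theorem pvUnionA_spec {m : Nat} {P : List Int} (hInv : pvInv m P) {x y : Int}
    (hx1 : -(m : Int) ≤ x) (hx2 : x < m) (hy1 : -(m : Int) ≤ y) (hy2 : y < m) :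
    ∃ P', pvUnionA P x y = P' ∧ pvInv m P' ∧
      (∀ k, k < m → pvRoot m P' k =
        (if pvRoot m P k = pvRoot m P (pvWrap m x) ∧ pvRoot m P (pvWrap m x) ≠ pvRoot m P (pvWrap m y)
         then pvRoot m P (pvWrap m y) else pvRoot m P k)) := by
  have hlen : P.length = m := hInv.1
  set wx := pvWrap m x with hwx
  set wy := pvWrap m y with hwy
  have hwxm : wx < m := pvWrap_lt' hx1 hx2
  have hwym : wy < m := pvWrap_lt' hy1 hy2
  obtain ⟨P1, hfind1, hInv1, hroot1⟩ := pvFindA_spec hInv hx1 hx2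
  obtain ⟨P2, hfind2, hInv2, hroot2⟩ := pvFindA_spec hInv1 hy1 hy2
  set rx := pvRoot m P wx with hrxd
  set ry := pvRoot m P wy with hryd
  have hrxm : rx < m := pvRoot_lt hInv hwxm
  have hrym : ry < m := pvRoot_lt hInv hwym
  have hlen1 : P1.length = m := hInv1.1
  have hry1 : pvRoot m P1 wy = ry := by rw [hroot1 _ hwym]
  have hroot2' : ∀ k, k < m → pvRoot m P2 k = pvRoot m P k := by
    intro k hk
    rw [hroot2 k hk, hroot1 k hk]
  have hfx2 : pvG P2 rx = rx := by
    apply pvG_root hInv2 hrxm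
    rw [hroot2' _ hrxm]
    exact pvRoot_root hInv hwxm
  have hfy2 : pvG P2 ry = ry := by
    apply pvG_root hInv2 hrym
    rw [hroot2' _ hrym]
    exact pvRoot_root hInv hwym
  unfold pvUnionA
  rw [hlen, hfind1]
  simp only
  rw [hlen1, hfind2, hry1]
  by_cases hcase : rx = ry
  · rw [if_neg (by simp [hcase])]
    refine ⟨P2, rfl, hInv2, ?_⟩
    intro k hk
    rw [if_neg (by simp [hcase]), hroot2' k hk]
  · rw [if_pos (by simpa using fun h => hcase (by exact_mod_cast h))]
    obtain ⟨hInv3, hroot3⟩ := pvLink hInv2 hrxm hrym hfx2 hfy2 hcase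
    refine ⟨_, by rw [PySem.List.pySetD_natCast], hInv3, ?_⟩
    intro k hk
    rw [hroot3 k hk, hroot2' k hk]
    by_cases hc2 : pvRoot m P k = rx
    · rw [if_pos hc2, if_pos ⟨hc2, hcase⟩]
    · rw [if_neg hc2, if_neg (by simp [hc2])]

-- ===== B-side machinery =====

-- folding pySetD over a list of in-range indices
theorem pvFoldSet (n : Int) (v : Int) :
    ∀ (L : List Int) (C : List Int), (∀ e ∈ L, 0 ≤ e ∧ e < n) → C.length = n.toNat →
      (L.foldl (fun c k => PySem.List.pySetD c k v) C).length = n.toNat ∧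
      (∀ k, k < n.toNat →
        (L.foldl (fun c k => PySem.List.pySetD c k v) C).getD k 0 =
          if ((k : Int)) ∈ L then v else C.getD k 0) := by
  intro L
  induction L with
  | nil => intro C hL hC; exact ⟨hC, fun k hk => by simp⟩
  | cons e L ih =>
      intro C hL hC
      have he := hL e List.mem_cons_self
      have hset : PySem.List.pySetD C e v = C.set e.toNat v := by
        rw [PySem.List.pySetD_of_nonneg C v he.1]
      have hC' : (C.set e.toNat v).length = n.toNat := by
        rw [List.length_set, hC]
      obtain ⟨hlen, hget⟩ := ih (C.set e.toNat v) (fun x hx => hL x (List.mem_cons_of_mem _ hx)) hC'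
      refine ⟨by simpa [hset] using hlen, ?_⟩
      intro k hk
      rw [List.foldl_cons, hset, hget k hk]
      by_cases hmem : ((k : Int)) ∈ L
      · rw [if_pos hmem, if_pos (List.mem_cons_of_mem _ hmem)]
      · rw [if_neg hmem]
        by_cases hke : ((k : Int)) = e
        · rw [if_pos (by simp [hke]), pvGetD_set C e.toNat k v 0 (by omega), if_pos (by omega)]
        · rw [if_neg (by simp [hke, hmem]), pvGetD_set C e.toNat k v 0 (by omega),
            if_neg (by intro h; apply hke; omega)]

-- filtering a disjunction of disjoint predicates
theorem pvFilterOr {α : Type} (l : List α) (p q : α → Bool) (hdisj : ∀ x ∈ l, ¬(p x = true ∧ q x = true)) :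
    (l.filter (fun x => p x || q x)).Perm (l.filter p ++ l.filter q) := by
  induction l with
  | nil => simp
  | cons a l ih =>
      have hd := hdisj a List.mem_cons_self
      have ih' := ih (fun x hx => hdisj x (List.mem_cons_of_mem _ hx))
      by_cases hp : p a
      · have hq : ¬ q a = true := fun h => hd ⟨hp, h⟩
        simpa [List.filter_cons, hp, hq] using ih'.cons a
      · by_cases hq : q a
        · have h1 : (l.filter p ++ a :: l.filter q).Perm (a :: (l.filter p ++ l.filter q)) :=
            List.perm_middle
          simpa [List.filter_cons, hp, hq] using (ih'.cons a).trans h1.symm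
        · simpa [List.filter_cons, hp, hq] using ih'

-- filter of range by equality with a fixed element
theorem pvRangeFilterEq (m c : Nat) (hc : c < m) :
    (List.range m).filter (fun k => k == c) = [c] := by
  induction m with
  | zero => omega
  | succ m ih =>
      rw [List.range_succ, List.filter_append]
      by_cases hcm : c = m
      · subst hcm
        have h1 : (List.range c).filter (fun k => k == c) = [] := by
          rw [List.filter_eq_nil_iff]
          intro a ha
          simp only [beq_iff_eq]
          have := List.mem_range.1 ha
          omega
        simp [h1]
      · rw [ih (by omega)]
        have : ¬ m = c := fun h => hcm h.symm
        simp [this]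

-- getD of pyRange 0 n 1
theorem pvPyRange_eq (n : Int) : PySem.List.pyRange 0 n 1 = List.map Int.ofNat (List.range n.toNat) := by
  rw [PySem.List.pyRange_one]
  have h1 : (n - 0).toNat = n.toNat := by omega
  rw [h1]
  apply List.map_congr_left
  intro a _
  have h2 : Int.ofNat a = (a : Int) := rfl
  rw [h2]
  omega

theorem pvPyRange_getElem? (n : Int) (k : Nat) (hk : k < n.toNat) :
    (PySem.List.pyRange 0 n 1)[k]? = some ((k : Nat) : Int) := by
  rw [pvPyRange_eq, List.getElem?_map, List.getElem?_range hk]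
  rfl

theorem pvMem_pyRange (n x : Int) : x ∈ PySem.List.pyRange 0 n 1 ↔ 0 ≤ x ∧ x < n := by
  rw [PySem.List.mem_pyRange_one]

theorem pvPyRange_getD (n : Int) (k : Nat) (hk : k < n.toNat) :
    (PySem.List.pyRange 0 n 1).getD k 0 = (k : Int) := by
  rw [List.getD_eq_getElem?_getD, pvPyRange_getElem? n k hk]
  rfl

theorem pvPyRange_length (n : Int) : (PySem.List.pyRange 0 n 1).length = n.toNat := by
  rw [PySem.List.length_pyRange_one]
  congr 1
  omega

-- the B-side relation between A's parent array and B's (comp, members) state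
def pvRel (n : Int) (P C : List Int) (M : List (List Int)) : Prop :=
  pvInv n.toNat P ∧ C.length = n.toNat ∧ M.length = n.toNat ∧
  (∀ k, k < n.toNat → C.getD k 0 = (pvG C k : Int) ∧ pvG C k < n.toNat) ∧
  (∀ k l, k < n.toNat → l < n.toNat →
    (pvG C k = pvG C l ↔ pvRoot n.toNat P k = pvRoot n.toNat P l)) ∧
  (∀ c, c < n.toNat → (M.getD c []).Perm
    ((PySem.List.pyRange 0 n 1).filter (fun i => C.getD i.toNat 0 == (c : Int))))

-- the initial states are related
theorem pvRel_init (n : Int) :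
    pvRel n (PySem.List.pyRange 0 n 1) (PySem.List.pyRange 0 n 1)
      ((PySem.List.pyRange 0 n 1).map (fun i => [i])) := by
  set m := n.toNat with hm
  set R := PySem.List.pyRange 0 n 1 with hR
  have hlen : R.length = m := pvPyRange_length n
  have hget : ∀ k, k < m → R.getD k 0 = (k : Int) := fun k hk => pvPyRange_getD n k hk
  have hG : ∀ k, k < m → pvG R k = k := by
    intro k hk
    unfold pvG
    rw [hget k hk]
    omega
  have hRoot : ∀ k, k < m → pvRoot m R k = k := by
    intro k hk
    exact Function.iterate_fixed (hG k hk) m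
  have hInv : pvInv m R := by
    refine ⟨hlen, ?_, ?_⟩
    · intro k hk
      rw [hG k hk]
      exact ⟨hget k hk, hk⟩
    · intro k hk
      exact ⟨0, Nat.zero_le _, by simpa using hG k hk⟩
  refine ⟨hInv, hlen, by simpa using hlen, ?_, ?_, ?_⟩
  · intro k hk
    rw [hG k hk]
    exact ⟨hget k hk, hk⟩
  · intro k l hk hl
    rw [hG k hk, hG l hl, hRoot k hk, hRoot l hl]
  · intro c hc
    have h1 : (R.map (fun i => [i])).getD c [] = [(c : Int)] := by
      rw [List.getD_eq_getElem?_getD, List.getElem?_map, hR, pvPyRange_getElem? n c hc]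
      rfl
    have h2 : R.filter (fun i => R.getD i.toNat 0 == (c : Int)) = [(c : Int)] := by
      have hcong : R.filter (fun i => R.getD i.toNat 0 == (c : Int)) =
          R.filter (fun i => i == (c : Int)) := by
        apply List.filter_congr
        intro x hx
        have hx' := (pvMem_pyRange n x).1 (by rwa [← hR])
        have hxt : x.toNat < m := by omega
        rw [hget x.toNat hxt]
        congr 1
        omega
      rw [hcong, hR, pvPyRange_eq, List.filter_map]
      have h3 : (List.range m).filter ((fun i => i == (c : Int)) ∘ Int.ofNat) =
          (List.range m).filter (fun k => k == c) := by
        apply List.filter_congr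
        intro x _
        simp only [Function.comp]
        rcases eq_or_ne x c with rfl | hxc
        · simp
        · simp [hxc]
      rw [h3, pvRangeFilterEq m c hc]
      rfl
    rw [h1, h2]

-- one pair step preserves the relation
theorem pvRel_step (n : Int) (P C : List Int) (M : List (List Int)) (i j : Int)
    (hrel : pvRel n P C M) (hi1 : -n ≤ i) (hi2 : i < n) (hj1 : -n ≤ j) (hj2 : j < n) :
    pvRel n (pvUnionA P i j)
      ((if PySem.List.pyGetD C i 0 ≠ PySem.List.pyGetD C j 0 then
          ((PySem.List.pyGetD M (PySem.List.pyGetD C j 0) []).foldl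
            (fun c k => PySem.List.pySetD c k (PySem.List.pyGetD C i 0)) C,
           PySem.List.pySetD (PySem.List.pySetD M (PySem.List.pyGetD C i 0)
             (PySem.List.pyGetD M (PySem.List.pyGetD C i 0) [] ++
              PySem.List.pyGetD M (PySem.List.pyGetD C j 0) [])) (PySem.List.pyGetD C j 0) []
          ) else (C, M)).1)
      ((if PySem.List.pyGetD C i 0 ≠ PySem.List.pyGetD C j 0 then
          ((PySem.List.pyGetD M (PySem.List.pyGetD C j 0) []).foldl
            (fun c k => PySem.List.pySetD c k (PySem.List.pyGetD C i 0)) C,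
           PySem.List.pySetD (PySem.List.pySetD M (PySem.List.pyGetD C i 0)
             (PySem.List.pyGetD M (PySem.List.pyGetD C i 0) [] ++
              PySem.List.pyGetD M (PySem.List.pyGetD C j 0) [])) (PySem.List.pyGetD C j 0) []
          ) else (C, M)).2) := by
  obtain ⟨hInv, hClen, hMlen, hCval, hSame, hMem⟩ := hrel
  set m := n.toNat with hm
  have hn0 : 0 < n := by omega
  have hnm : ((m : Nat) : Int) = n := by omega
  set wi := pvWrap n i with hwi
  set wj := pvWrap n j with hwj
  have hwim : wi < m := by rw [hwi]; unfold pvWrap; split <;> omega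
  have hwjm : wj < m := by rw [hwj]; unfold pvWrap; split <;> omega
  have hgi : PySem.List.pyGetD C i 0 = ((pvG C wi : Nat) : Int) := by
    rw [pvGetD_int C n i (by omega) hi1 hi2, ← hwi]
    exact (hCval wi hwim).1
  have hgj : PySem.List.pyGetD C j 0 = ((pvG C wj : Nat) : Int) := by
    rw [pvGetD_int C n j (by omega) hj1 hj2, ← hwj]
    exact (hCval wj hwjm).1
  obtain ⟨P', hPU, hInvU, hrootU⟩ := pvUnionA_spec hInv
    (x := i) (y := j) (by omega) (by omega) (by omega) (by omega)
  have hwrapi : pvWrap ((m : Nat) : Int) i = wi := by rw [hnm]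
  have hwrapj : pvWrap ((m : Nat) : Int) j = wj := by rw [hnm]
  rw [hwrapi, hwrapj] at hrootU
  set rx := pvRoot m P wi with hrx
  set ry := pvRoot m P wj with hry
  rw [hPU]
  by_cases hcc : pvG C wi = pvG C wj
  · have hrxy : rx = ry := (hSame wi wj hwim hwjm).1 hcc
    have hcond : ¬ (PySem.List.pyGetD C i 0 ≠ PySem.List.pyGetD C j 0) := by
      rw [hgi, hgj, hcc]
      exact fun h => h rfl
    rw [if_neg hcond]
    have hroots : ∀ k, k < m → pvRoot m P' k = pvRoot m P k := by
      intro k hk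
      rw [hrootU k hk]
      simp [hrxy]
    refine ⟨hInvU, hClen, hMlen, hCval, ?_, hMem⟩
    intro k l hk hl
    rw [hroots k hk, hroots l hl]
    exact hSame k l hk hl
  · have hrxy : rx ≠ ry := fun h => hcc ((hSame wi wj hwim hwjm).2 h)
    have hcond : PySem.List.pyGetD C i 0 ≠ PySem.List.pyGetD C j 0 := by
      rw [hgi, hgj]
      intro h
      exact hcc (by exact_mod_cast h)
    rw [if_pos hcond]
    dsimp only
    set cci := pvG C wi with hcci
    set ccj := pvG C wj with hccj
    have hccim : cci < m := (hCval wi hwim).2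
    have hccjm : ccj < m := (hCval wj hwjm).2
    have hcij : cci ≠ ccj := hcc
    have hmj : PySem.List.pyGetD M (PySem.List.pyGetD C j 0) [] = M.getD ccj [] := by
      rw [hgj, PySem.List.pyGetD_natCast]
    have hmi : PySem.List.pyGetD M (PySem.List.pyGetD C i 0) [] = M.getD cci [] := by
      rw [hgi, PySem.List.pyGetD_natCast]
    have hmjperm := hMem ccj hccjm
    have hmiperm := hMem cci hccim
    have hmjmem : ∀ e ∈ M.getD ccj [], 0 ≤ e ∧ e < n := by
      intro e he
      exact (pvMem_pyRange n e).1 (List.mem_of_mem_filter (hmjperm.subset he))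
    rw [hmj, hmi, hgi, hgj]
    obtain ⟨hC'len, hC'get⟩ :=
      pvFoldSet n ((cci : Nat) : Int) (M.getD ccj []) C hmjmem hClen
    set C' := (M.getD ccj []).foldl (fun c k => PySem.List.pySetD c k ((cci : Nat) : Int)) C with hC'
    have hmemiff : ∀ k, k < m → (((k : Nat) : Int) ∈ M.getD ccj [] ↔ pvG C k = ccj) := by
      intro k hk
      rw [hmjperm.mem_iff]
      constructor
      · intro hmem
        have h1 := List.of_mem_filter hmem
        have h2 : ((k : Int)).toNat = k := by omega
        rw [h2, (hCval k hk).1] at h1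
        have h3 : ((pvG C k : Nat) : Int) = ((ccj : Nat) : Int) := by simpa using h1
        exact_mod_cast h3
      · intro hGk
        apply List.mem_filter.2
        refine ⟨(pvMem_pyRange n _).2 ⟨by omega, by omega⟩, ?_⟩
        have h2 : ((k : Int)).toNat = k := by omega
        rw [h2, (hCval k hk).1, hGk]
        exact beq_self_eq_true _
    have hGC' : ∀ k, k < m → pvG C' k = if pvG C k = ccj then cci else pvG C k := by
      intro k hk
      rw [show pvG C' k = (C'.getD k 0).toNat from rfl, hC'get k hk]
      by_cases h : pvG C k = ccj
      · rw [if_pos ((hmemiff k hk).2 h), if_pos h]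
        omega
      · rw [if_neg (fun hmm => h ((hmemiff k hk).1 hmm)), if_neg h]
        rfl
    have hC'val : ∀ k, k < m → C'.getD k 0 = (pvG C' k : Int) ∧ pvG C' k < m := by
      intro k hk
      by_cases h : pvG C k = ccj
      · rw [hC'get k hk, if_pos ((hmemiff k hk).2 h), hGC' k hk, if_pos h]
        exact ⟨rfl, hccim⟩
      · rw [hC'get k hk, if_neg (fun hmm => h ((hmemiff k hk).1 hmm)), hGC' k hk, if_neg h]
        exact hCval k hk
    have hrootU' : ∀ k, k < m → pvRoot m P' k = if pvRoot m P k = rx then ry else pvRoot m P k := by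
      intro k hk
      rw [hrootU k hk]
      by_cases h : pvRoot m P k = rx
      · simp [h, hrxy]
      · simp [h]
    have hlab : ∀ k, k < m →
        ((pvG C k = cci ↔ pvRoot m P k = rx) ∧ (pvG C k = ccj ↔ pvRoot m P k = ry)) :=
      fun k hk => ⟨hSame k wi hk hwim, hSame k wj hk hwjm⟩
    have hin : ∀ k, k < m → ((pvG C' k = cci ↔ pvRoot m P' k = ry) ∧
        (pvG C' k ≠ cci → (pvG C' k = pvG C k ∧ pvRoot m P' k = pvRoot m P k))) := by
      intro k hk
      constructor
      · rw [hGC' k hk, hrootU' k hk]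
        by_cases h1 : pvG C k = ccj
        · have h2 : pvRoot m P k = ry := (hlab k hk).2.1 h1
          rw [if_pos h1]
          constructor
          · intro _
            by_cases h3 : pvRoot m P k = rx
            · rw [if_pos h3]
            · rw [if_neg h3]
              exact h2
          · intro _
            rfl
        · have h2 : pvRoot m P k ≠ ry := fun h => h1 ((hlab k hk).2.2 h)
          rw [if_neg h1]
          constructor
          · intro h3
            rw [if_pos ((hlab k hk).1.1 h3)]
          · intro h3
            by_cases h4 : pvRoot m P k = rx
            · exact (hlab k hk).1.2 h4
            · rw [if_neg h4] at h3
              exact absurd h3 h2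
      · intro hne2
        have h1 : ¬ pvG C k = ccj := by
          intro h
          rw [hGC' k hk, if_pos h] at hne2
          exact hne2 rfl
        have h5 : pvG C' k = pvG C k := by rw [hGC' k hk, if_neg h1]
        refine ⟨h5, ?_⟩
        rw [hrootU' k hk, if_neg ?_]
        intro h6
        apply hne2
        rw [h5]
        exact (hlab k hk).1.2 h6
    have hSame' : ∀ k l, k < m → l < m →
        (pvG C' k = pvG C' l ↔ pvRoot m P' k = pvRoot m P' l) := by
      intro k l hk hl
      obtain ⟨hk1, hk2⟩ := hin k hk
      obtain ⟨hl1, hl2⟩ := hin l hl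
      by_cases ha : pvG C' k = cci <;> by_cases hb : pvG C' l = cci
      · exact iff_of_true (ha.trans hb.symm) ((hk1.1 ha).trans (hl1.1 hb).symm)
      · exact iff_of_false (fun h => hb (h ▸ ha)) (fun h => hb (hl1.2 (h ▸ hk1.1 ha)))
      · exact iff_of_false (fun h => ha (h.symm ▸ hb)) (fun h => ha (hk1.2 (h.symm ▸ hl1.1 hb)))
      · obtain ⟨e1, r1⟩ := hk2 ha
        obtain ⟨e2, r2⟩ := hl2 hb
        rw [e1, e2, r1, r2]
        exact hSame k l hk hl
    simp only [PySem.List.pySetD_natCast]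
    have hM'len2 : ((M.set cci (M.getD cci [] ++ M.getD ccj [])).set ccj []).length = m := by
      simp [hMlen]
    have hM'get : ∀ c, c < m →
        ((M.set cci (M.getD cci [] ++ M.getD ccj [])).set ccj []).getD c [] =
          if c = ccj then [] else if c = cci then M.getD cci [] ++ M.getD ccj []
          else M.getD c [] := by
      intro c hc
      rw [pvGetD_set _ ccj c [] [] (by simp [hMlen]; exact hccjm)]
      by_cases h : c = ccj
      · rw [if_pos h, if_pos h]
      · rw [if_neg h, if_neg h, pvGetD_set M cci c _ [] (by rw [hMlen]; exact hccim)]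
    refine ⟨hInvU, hC'len, hM'len2, hC'val, hSame', ?_⟩
    intro c hc
    rw [hM'get c hc]
    by_cases h1 : c = ccj
    · rw [if_pos h1]
      have hnil : (PySem.List.pyRange 0 n 1).filter
          (fun x => C'.getD x.toNat 0 == ((c : Nat) : Int)) = [] := by
        rw [List.filter_eq_nil_iff]
        intro x hx
        have hx' := (pvMem_pyRange n x).1 hx
        have hk : x.toNat < m := by omega
        simp only [(hC'val x.toNat hk).1, beq_iff_eq, Nat.cast_inj]
        rw [hGC' x.toNat hk]
        by_cases h2 : pvG C x.toNat = ccj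
        · rw [if_pos h2]
          omega
        · rw [if_neg h2]
          omega
      rw [hnil]
    · rw [if_neg h1]
      by_cases h2 : c = cci
      · rw [if_pos h2]
        have hdisj : ∀ x ∈ PySem.List.pyRange 0 n 1,
            ¬((C.getD x.toNat 0 == ((cci : Nat) : Int)) = true ∧
              (C.getD x.toNat 0 == ((ccj : Nat) : Int)) = true) := by
          intro x hx hand
          obtain ⟨ha', hb'⟩ := hand
          have hx' := (pvMem_pyRange n x).1 hx
          have hk : x.toNat < m := by omega
          rw [(hCval x.toNat hk).1] at ha' hb'
          simp only [beq_iff_eq, Nat.cast_inj] at ha' hb'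
          omega
        have hp := pvFilterOr (PySem.List.pyRange 0 n 1)
          (fun x => C.getD x.toNat 0 == ((cci : Nat) : Int))
          (fun x => C.getD x.toNat 0 == ((ccj : Nat) : Int)) hdisj
        have hcong : (PySem.List.pyRange 0 n 1).filter
            (fun x => C'.getD x.toNat 0 == ((c : Nat) : Int)) =
            (PySem.List.pyRange 0 n 1).filter
            (fun x => (C.getD x.toNat 0 == ((cci : Nat) : Int)) ||
                      (C.getD x.toNat 0 == ((ccj : Nat) : Int))) := by
          apply List.filter_congr
          intro x hx
          have hx' := (pvMem_pyRange n x).1 hx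
          have hk : x.toNat < m := by omega
          simp only [(hC'val x.toNat hk).1, (hCval x.toNat hk).1]
          rw [hGC' x.toNat hk, h2]
          by_cases h3 : pvG C x.toNat = ccj
          · rw [if_pos h3, h3]
            simp
          · rw [if_neg h3]
            simp [h3]
        rw [hcong]
        exact (hmiperm.append hmjperm).trans hp.symm
      · rw [if_neg h2]
        have hcong : (PySem.List.pyRange 0 n 1).filter
            (fun x => C'.getD x.toNat 0 == ((c : Nat) : Int)) =
            (PySem.List.pyRange 0 n 1).filter
            (fun x => C.getD x.toNat 0 == ((c : Nat) : Int)) := by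
          apply List.filter_congr
          intro x hx
          have hx' := (pvMem_pyRange n x).1 hx
          have hk : x.toNat < m := by omega
          simp only [(hC'val x.toNat hk).1, (hCval x.toNat hk).1]
          rw [Bool.eq_iff_iff]
          simp only [beq_iff_eq, Nat.cast_inj]
          rw [hGC' x.toNat hk]
          by_cases h3 : pvG C x.toNat = ccj
          · rw [if_pos h3, h3]
            constructor <;> (intro h4; omega)
          · rw [if_neg h3]
        rw [hcong]
        exact hMem c hc

-- ===== assembly =====

theorem pvWrap_nonneg (n x : Int) (h : 0 ≤ x) : pvWrap n x = x.toNat := by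
  unfold pvWrap
  rw [if_neg (by omega)]

-- B's fold step, as written in the port
def pvStepB (st : List Int × List (List Int)) (ij : Int × Int) : List Int × List (List Int) :=
  let ci := PySem.List.pyGetD st.1 ij.1 0
  let cj := PySem.List.pyGetD st.1 ij.2 0
  if ci ≠ cj then
    let mj := PySem.List.pyGetD st.2 cj []
    (mj.foldl (fun c k => PySem.List.pySetD c k ci) st.1,
     PySem.List.pySetD (PySem.List.pySetD st.2 ci (PySem.List.pyGetD st.2 ci [] ++ mj)) cj [])
  else st

theorem pvFoldRel (n : Int) : ∀ (pairs : List (Int × Int)) (P C : List Int) (M : List (List Int)),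
    (∀ p ∈ pairs, -n ≤ p.1 ∧ p.1 < n ∧ -n ≤ p.2 ∧ p.2 < n) → pvRel n P C M →
    pvRel n (pairs.foldl (fun p ij => pvUnionA p ij.1 ij.2) P)
      ((pairs.foldl pvStepB (C, M)).1) ((pairs.foldl pvStepB (C, M)).2) := by
  intro pairs
  induction pairs with
  | nil => intro P C M _ hrel; exact hrel
  | cons p rest ih =>
      intro P C M hpre hrel
      obtain ⟨h1, h2, h3, h4⟩ := hpre p List.mem_cons_self
      have hstep := pvRel_step n P C M p.1 p.2 hrel h1 h2 h3 h4
      rw [List.foldl_cons, List.foldl_cons]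
      exact ih (pvUnionA P p.1 p.2) (pvStepB (C, M) p).1 (pvStepB (C, M) p).2
        (fun q hq => hpre q (List.mem_cons_of_mem _ hq)) hstep

-- A's grouping loop: the dict accumulates by the (stable) root of each node
theorem pvGroup (n : Int) (R : Nat → Nat) :
    ∀ (l : List Int), (∀ i ∈ l, 0 ≤ i ∧ i < n) →
    ∀ (P : List Int) (d : PySem.Dict Int (List Int)), pvInv n.toNat P →
    (∀ k, k < n.toNat → pvRoot n.toNat P k = R k) →
    (l.foldl (fun (st : List Int × PySem.Dict Int (List Int)) i =>
        let fr := pvFindA (st.1.length + 1) st.1 i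
        (fr.2, st.2.modify fr.1 [] (fun ms => ms ++ [i]))) (P, d)).2 =
      l.foldl (fun d i => d.modify ((R i.toNat : Nat) : Int) [] (fun ms => ms ++ [i])) d := by
  intro l
  induction l with
  | nil => intro _ P d _ _; rfl
  | cons i rest ih =>
      intro hmem P d hInv hR
      obtain ⟨hi0, hin⟩ := hmem i List.mem_cons_self
      have hi1 : -((n.toNat : Nat) : Int) ≤ i := by omega
      have hi2 : i < ((n.toNat : Nat) : Int) := by omega
      obtain ⟨P', hfind, hInv', hroot'⟩ := pvFindA_spec hInv hi1 hi2
      have hwr : pvWrap ((n.toNat : Nat) : Int) i = i.toNat := pvWrap_nonneg _ i hi0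
      rw [List.foldl_cons, List.foldl_cons]
      have hlen : P.length = n.toNat := hInv.1
      have happ : (let fr := pvFindA ((P, d).1.length + 1) (P, d).1 i
          ((fr.2 : List Int), (P, d).2.modify fr.1 [] (fun ms => ms ++ [i]))) =
          (P', d.modify ((R i.toNat : Nat) : Int) [] (fun ms => ms ++ [i])) := by
        show (let fr := pvFindA (P.length + 1) P i
          ((fr.2 : List Int), d.modify fr.1 [] (fun ms => ms ++ [i]))) = _
        rw [hlen, hfind]
        show (P', d.modify ((pvRoot n.toNat P (pvWrap ((n.toNat : Nat) : Int) i) : Nat) : Int) [] _) = _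
        rw [hwr, hR i.toNat (by omega)]
      rw [happ]
      exact ih (fun x hx => hmem x (List.mem_cons_of_mem _ hx)) P' _ hInv'
        (fun k hk => by rw [hroot' k hk, hR k hk])

-- values of a dict with distinct keys, as a map over its keys
theorem pvDictValues {κ ν : Type} [BEq κ] [LawfulBEq κ] (d : PySem.Dict κ ν)
    (h : d.keys.Nodup) (d0 : ν) : d.values = d.keys.map (fun k => d.getD k d0) := by
  show d.items.map (fun p => p.2) = (d.items.map (fun p => p.1)).map (fun k => d.getD k d0)
  rw [List.map_map]
  apply List.map_congr_left
  intro p hp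
  have : d.getD p.1 d0 = p.2 := PySem.Dict.getD_of_mem_items d (by simpa using hp) h d0
  simp [Function.comp, this]

-- the main equivalence
theorem pvMain (pairs_strong : List (Int × Int)) (n : Int)
    (hpre : ∀ p ∈ pairs_strong, -n ≤ p.1 ∧ p.1 < n ∧ -n ≤ p.2 ∧ p.2 < n) :
    transitive_closure_clusters pairs_strong n = transitive_closure_clusters_alt pairs_strong n := by
  set m := n.toNat with hm
  set R0 := PySem.List.pyRange 0 n 1 with hR0
  set P1 := pairs_strong.foldl (fun p ij => pvUnionA p ij.1 ij.2) R0 with hP1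
  set BS := pairs_strong.foldl pvStepB (R0, R0.map (fun i => [i])) with hBS
  obtain ⟨hInv1, hClen, hMlen, hCval, hSame, hMem⟩ :=
    pvFoldRel n pairs_strong R0 R0 (R0.map (fun i => [i])) hpre (pvRel_init n)
  rw [← hBS] at hClen hMlen hCval hSame hMem
  rw [← hP1] at hInv1 hSame
  have hgroup := pvGroup n (fun k => pvRoot m P1 k) R0
    (fun i hi => (pvMem_pyRange n i).1 hi) P1 PySem.Dict.empty hInv1 (fun k _ => rfl)
  show PySem.List.sorted
      (((R0.foldl (fun (st : List Int × PySem.Dict Int (List Int)) i =>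
            let fr := pvFindA (st.1.length + 1) st.1 i
            (fr.2, st.2.modify fr.1 [] (fun l => l ++ [i]))) (P1, PySem.Dict.empty)).2.values.filter
          (fun ms => 2 ≤ ms.length)).map (fun ms => PySem.List.sorted ms (fun x => x) false))
      pvKeyA false
    = PySem.List.sorted
      ((BS.2.filter (fun ms => 2 ≤ ms.length)).map (fun ms => PySem.List.sorted ms (fun x => x) false))
      pvKeyB false
  rw [hgroup]
  -- the dict built by the grouping loop
  set D := R0.foldl (fun d i =>
    d.modify ((pvRoot m P1 i.toNat : Nat) : Int) [] (fun ms => ms ++ [i])) PySem.Dict.empty with hD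
  have hDfold : D = (R0.map (fun i => (((pvRoot m P1 i.toNat : Nat) : Int), i))).foldl
      (fun d p => d.modify p.1 [] (fun ms => ms ++ [p.2])) PySem.Dict.empty := by
    rw [List.foldl_map]
  have hkeys : D.keys = PySem.Set.ofList (R0.map (fun i => ((pvRoot m P1 i.toNat : Nat) : Int))) := by
    rw [hD]
    exact PySem.Dict.keys_foldl_modify_key R0 (fun i => ((pvRoot m P1 i.toNat : Nat) : Int)) []
      (fun _ i => fun ms => ms ++ [i]) PySem.Dict.empty
  have hknodup : D.keys.Nodup := by
    rw [hkeys]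
    exact PySem.Set.nodup_ofList _
  have hgetD : ∀ c : Int, D.getD c [] =
      R0.filter (fun i => ((pvRoot m P1 i.toNat : Nat) : Int) == c) := by
    intro c
    rw [hDfold, PySem.Dict.getD_foldl_modify_append, PySem.Dict.getD_empty, List.nil_append,
      List.filter_map, List.map_map]
    have h1 : ((fun (x : Int × Int) => x.2) ∘ (fun i => (((pvRoot m P1 i.toNat : Nat) : Int), i)))
        = id := rfl
    have h2 : ((fun (p : Int × Int) => p.1 == c) ∘ (fun i => (((pvRoot m P1 i.toNat : Nat) : Int), i)))
        = fun i => ((pvRoot m P1 i.toNat : Nat) : Int) == c := rfl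
    rw [h1, h2, List.map_id]
  have hVA : D.values = D.keys.map (fun r =>
      R0.filter (fun i => ((pvRoot m P1 i.toNat : Nat) : Int) == r)) := by
    rw [pvDictValues D hknodup []]
    exact List.map_congr_left (fun r _ => hgetD r)
  -- A's clusters: the within-cluster sort is a no-op
  have hblockSorted : ∀ (r : Int),
      List.Pairwise (fun a b => a ≤ b)
        (R0.filter (fun i => ((pvRoot m P1 i.toNat : Nat) : Int) == r)) :=
    fun r => ((PySem.List.pairwise_lt_pyRange_one 0 n).filter _).imp (fun h => le_of_lt h)
  have hCA : ((D.values.filter (fun ms => 2 ≤ ms.length)).map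
      (fun ms => PySem.List.sorted ms (fun x => x) false)) =
      D.values.filter (fun ms => 2 ≤ ms.length) := by
    have h1 : ∀ X ∈ D.values.filter (fun ms => 2 ≤ ms.length),
        PySem.List.sorted X (fun x => x) false = X := by
      intro X hX
      have hX' := List.mem_of_mem_filter hX
      rw [hVA] at hX'
      obtain ⟨r, hr, rfl⟩ := List.mem_map.1 hX'
      exact PySem.List.sorted_eq_self_of_pairwise _ _ (hblockSorted r)
    rw [List.map_congr_left h1]
    exact List.map_id' _
  rw [hCA]
  -- B's members list, re-indexed by position
  have hMrep : BS.2 = List.map (fun c => PySem.List.pyGetD BS.2 c [])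
      (PySem.List.pyRange 0 ((BS.2.length : Nat) : Int) 1) :=
    (PySem.List.map_pyGetD_pyRange_zero' BS.2 []).symm
  have hgB : ∀ c : Int, 0 ≤ c → c < (m : Int) →
      PySem.List.pyGetD BS.2 c [] = BS.2.getD c.toNat [] := by
    intro c h1 h2
    rw [pvGetD_int BS.2 ((m : Nat) : Int) c (by simpa using hMlen) (by omega) (by omega),
      pvWrap_nonneg _ c h1]
  have hCB : (BS.2.filter (fun ms => 2 ≤ ms.length)).map
      (fun ms => PySem.List.sorted ms (fun x => x) false) =
      ((PySem.List.pyRange 0 ((m : Nat) : Int) 1).filter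
        (fun c => 2 ≤ (PySem.List.pyGetD BS.2 c []).length)).map
        (fun c => PySem.List.sorted (PySem.List.pyGetD BS.2 c []) (fun x => x) false) := by
    conv_lhs => rw [hMrep]
    rw [List.filter_map, List.map_map, hMlen]
    rfl
  rw [hCB]
  -- each kept member list sorts to the canonical block of its component id
  have hsortB : ∀ c ∈ (PySem.List.pyRange 0 ((m : Nat) : Int) 1).filter
      (fun c => 2 ≤ (PySem.List.pyGetD BS.2 c []).length),
      PySem.List.sorted (PySem.List.pyGetD BS.2 c []) (fun x => x) false =
        R0.filter (fun x => BS.1.getD x.toNat 0 == ((c.toNat : Nat) : Int)) := by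
    intro c hc
    have hc' := (pvMem_pyRange ((m : Nat) : Int) c).1 (List.mem_of_mem_filter hc)
    have hcm : c.toNat < m := by omega
    rw [hgB c hc'.1 hc'.2]
    exact PySem.List.sorted_id_eq_of_perm_of_pairwise _ _ (hMem c.toNat hcm).symm
      (((PySem.List.pairwise_lt_pyRange_one 0 n).filter _).imp (fun h => le_of_lt h))
  rw [List.map_congr_left hsortB]
  -- the two cluster lists are permutations of each other
  have hqlen : ∀ c : Int, 0 ≤ c → c < (m : Int) →
      (PySem.List.pyGetD BS.2 c []).length =
        (R0.filter (fun x => BS.1.getD x.toNat 0 == ((c.toNat : Nat) : Int))).length := by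
    intro c h1 h2
    rw [hgB c h1 h2]
    exact (hMem c.toNat (by omega)).length_eq
  have hlink : ∀ k, k < m →
      R0.filter (fun x => BS.1.getD x.toNat 0 == ((pvG BS.1 k : Nat) : Int)) =
      R0.filter (fun i => ((pvRoot m P1 i.toNat : Nat) : Int) == ((pvRoot m P1 k : Nat) : Int)) := by
    intro k hk
    apply List.filter_congr
    intro x hx
    have hx' := (pvMem_pyRange n x).1 hx
    have hxm : x.toNat < m := by omega
    rw [(hCval x.toNat hxm).1, Bool.eq_iff_iff]
    simp only [beq_iff_eq, Nat.cast_inj]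
    exact hSame x.toNat k hxm hk
  have hblA : ∀ X, X ∈ D.values.filter (fun ms => 2 ≤ ms.length) ↔ ∃ k : Nat, k < m ∧
      2 ≤ X.length ∧
      X = R0.filter (fun i => ((pvRoot m P1 i.toNat : Nat) : Int) == ((pvRoot m P1 k : Nat) : Int)) := by
    intro X
    constructor
    · intro hX
      have h2 := List.of_mem_filter hX
      have hXv := List.mem_of_mem_filter hX
      rw [hVA] at hXv
      obtain ⟨r, hr, rfl⟩ := List.mem_map.1 hXv
      rw [hkeys, PySem.Set.mem_ofList] at hr
      obtain ⟨i, hi, rfl⟩ := List.mem_map.1 hr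
      have hi' := (pvMem_pyRange n i).1 hi
      exact ⟨i.toNat, by omega, by simpa using h2, rfl⟩
    · rintro ⟨k, hk, hlen2, rfl⟩
      apply List.mem_filter.2
      refine ⟨?_, by simpa using hlen2⟩
      rw [hVA]
      apply List.mem_map.2
      refine ⟨((pvRoot m P1 k : Nat) : Int), ?_, rfl⟩
      rw [hkeys, PySem.Set.mem_ofList]
      apply List.mem_map.2
      refine ⟨((k : Nat) : Int), (pvMem_pyRange n _).2 ⟨by omega, by omega⟩, ?_⟩
      have h3 : (((k : Nat) : Int)).toNat = k := by omega
      rw [h3]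
  have hblB : ∀ X, X ∈ (List.map (fun a => List.filter (fun x => BS.1.getD x.toNat 0 == ((a.toNat : Nat) : Int)) R0)
        (List.filter (fun c => 2 ≤ (PySem.List.pyGetD BS.2 c []).length)
          (PySem.List.pyRange 0 ((m : Nat) : Int) 1))) ↔ ∃ k : Nat, k < m ∧
      2 ≤ X.length ∧
      X = R0.filter (fun i => ((pvRoot m P1 i.toNat : Nat) : Int) == ((pvRoot m P1 k : Nat) : Int)) := by
    intro X
    constructor
    · intro hX
      obtain ⟨c, hcmem, rfl⟩ := List.mem_map.1 hX
      have hq := List.of_mem_filter hcmem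
      have hc' := (pvMem_pyRange ((m : Nat) : Int) c).1 (List.mem_of_mem_filter hcmem)
      have hcm : c.toNat < m := by omega
      have h2X : 2 ≤ (R0.filter (fun x => BS.1.getD x.toNat 0 == ((c.toNat : Nat) : Int))).length := by
        rw [← hqlen c hc'.1 hc'.2]
        simpa using hq
      have hpos : 0 < (R0.filter (fun x => BS.1.getD x.toNat 0 == ((c.toNat : Nat) : Int))).length := by omega
      obtain ⟨x, hx⟩ := List.exists_mem_of_length_pos hpos
      have hxR := List.mem_of_mem_filter hx
      have hcond := List.of_mem_filter hx
      have hx' := (pvMem_pyRange n x).1 hxR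
      have hxm : x.toNat < m := by omega
      have hcval : pvG BS.1 x.toNat = c.toNat := by
        rw [(hCval x.toNat hxm).1] at hcond
        have h4 : ((pvG BS.1 x.toNat : Nat) : Int) = ((c.toNat : Nat) : Int) := by simpa using hcond
        exact_mod_cast h4
      refine ⟨x.toNat, hxm, h2X, ?_⟩
      rw [← hcval]
      exact hlink x.toNat hxm
    · rintro ⟨k, hk, hlen2, rfl⟩
      apply List.mem_map.2
      have hGm : pvG BS.1 k < m := (hCval k hk).2
      refine ⟨((pvG BS.1 k : Nat) : Int), ?_, ?_⟩
      · apply List.mem_filter.2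
        refine ⟨(pvMem_pyRange _ _).2 ⟨by omega, by omega⟩, ?_⟩
        have h5 : (((pvG BS.1 k : Nat) : Int)).toNat = pvG BS.1 k := by omega
        have h6 := hqlen ((pvG BS.1 k : Nat) : Int) (by omega) (by omega)
        rw [h5] at h6
        rw [hlink k hk] at h6
        simp only [decide_eq_true_eq]
        omega
      · have h5 : (((pvG BS.1 k : Nat) : Int)).toNat = pvG BS.1 k := by omega
        rw [h5]
        exact hlink k hk
  have hVAnodup : (D.values.filter (fun ms => 2 ≤ ms.length)).Nodup := by
    apply List.Nodup.filter
    rw [hVA]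
    apply List.Nodup.map_on ?_ hknodup
    intro r1 h1 r2 h2 heq
    rw [hkeys, PySem.Set.mem_ofList] at h1
    obtain ⟨i, hi, rfl⟩ := List.mem_map.1 h1
    have himem : i ∈ R0.filter
        (fun i' => ((pvRoot m P1 i'.toNat : Nat) : Int) == ((pvRoot m P1 i.toNat : Nat) : Int)) :=
      List.mem_filter.2 ⟨hi, by simp⟩
    rw [heq] at himem
    have h3 := List.of_mem_filter himem
    simpa using h3
  have hLBnodup : (List.map (fun a => List.filter (fun x => BS.1.getD x.toNat 0 == ((a.toNat : Nat) : Int)) R0)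
      (List.filter (fun c => 2 ≤ (PySem.List.pyGetD BS.2 c []).length)
        (PySem.List.pyRange 0 ((m : Nat) : Int) 1))).Nodup := by
    apply List.Nodup.map_on ?_ ((PySem.List.nodup_pyRange_one 0 _).filter _)
    intro c1 h1 c2 h2 heq
    have hq1 := List.of_mem_filter h1
    have hc1 := (pvMem_pyRange ((m : Nat) : Int) c1).1 (List.mem_of_mem_filter h1)
    have hc2 := (pvMem_pyRange ((m : Nat) : Int) c2).1 (List.mem_of_mem_filter h2)
    have hpos : 0 < (R0.filter (fun x => BS.1.getD x.toNat 0 == ((c1.toNat : Nat) : Int))).length := by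
      rw [← hqlen c1 hc1.1 hc1.2]
      simp only [decide_eq_true_eq] at hq1
      omega
    obtain ⟨x, hx⟩ := List.exists_mem_of_length_pos hpos
    have hcond1 := List.of_mem_filter hx
    rw [heq] at hx
    have hcond2 := List.of_mem_filter hx
    simp only [beq_iff_eq] at hcond1 hcond2
    have : c1.toNat = c2.toNat := by
      have h4 : ((c1.toNat : Nat) : Int) = ((c2.toNat : Nat) : Int) := by rw [← hcond1, hcond2]
      exact_mod_cast h4
    omega
  have hperm : (D.values.filter (fun ms => 2 ≤ ms.length)).Perm
      (List.map (fun a => List.filter (fun x => BS.1.getD x.toNat 0 == ((a.toNat : Nat) : Int)) R0)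
        (List.filter (fun c => 2 ≤ (PySem.List.pyGetD BS.2 c []).length)
          (PySem.List.pyRange 0 ((m : Nat) : Int) 1))) :=
    (List.perm_ext_iff_of_nodup hVAnodup hLBnodup).2 (fun X => (hblA X).trans (hblB X).symm)
  -- the final sort key is injective on the cluster lists, so the common sort is unique
  have hheadmem : ∀ (X : List Int), X ≠ [] → PySem.List.pyGetD X 0 0 ∈ X := by
    intro X hX
    rcases X with _ | ⟨x0, xr⟩
    · exact absurd rfl hX
    · rw [PySem.List.pyGetD_zero_cons]
      exact List.mem_cons_self
  have hkeyinj : ∀ X ∈ D.values.filter (fun ms => 2 ≤ ms.length),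
      ∀ Y ∈ D.values.filter (fun ms => 2 ≤ ms.length), pvKeyA X = pvKeyA Y → X = Y := by
    intro X hX Y hY hkeq
    obtain ⟨k1, hk1, hl1, hX1⟩ := (hblA X).1 hX
    obtain ⟨k2, hk2, hl2, hY1⟩ := (hblA Y).1 hY
    unfold pvKeyA at hkeq
    rw [toLex_inj, Prod.mk.injEq] at hkeq
    obtain ⟨-, hhead⟩ := hkeq
    have hXne : X ≠ [] := by intro h; rw [h] at hl1; simp at hl1
    have hYne : Y ≠ [] := by intro h; rw [h] at hl2; simp at hl2
    have hx0X := hheadmem X hXne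
    have hx0Y : PySem.List.pyGetD X 0 0 ∈ Y := by rw [hhead]; exact hheadmem Y hYne
    set e := PySem.List.pyGetD X 0 0 with he
    rw [hX1] at hx0X
    rw [hY1] at hx0Y
    have hc1 : ((pvRoot m P1 e.toNat : Nat) : Int) = ((pvRoot m P1 k1 : Nat) : Int) := by
      simpa using List.of_mem_filter hx0X
    have hc2 : ((pvRoot m P1 e.toNat : Nat) : Int) = ((pvRoot m P1 k2 : Nat) : Int) := by
      simpa using List.of_mem_filter hx0Y
    rw [hX1, hY1, ← hc1, ← hc2]
  have hnd : (PySem.List.sorted (D.values.filter (fun ms => 2 ≤ ms.length)) pvKeyA false).Nodup :=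
    ((PySem.List.sorted_perm _ pvKeyA false).nodup_iff).2 hVAnodup
  have hpairLA : (PySem.List.sorted (D.values.filter (fun ms => 2 ≤ ms.length)) pvKeyA false).Pairwise
      (fun a b => pvKeyA a < pvKeyA b) := by
    have hle := PySem.List.sorted_pairwise (D.values.filter (fun ms => 2 ≤ ms.length)) pvKeyA
    refine (hle.and hnd).imp_of_mem ?_
    intro a b ha hb hab
    refine lt_of_le_of_ne hab.1 (fun he => hab.2 ?_)
    exact hkeyinj a ((PySem.List.mem_sorted _ _ _ a).1 ha) b ((PySem.List.mem_sorted _ _ _ b).1 hb) he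
  have hkeyBA : pvKeyB = pvKeyA := rfl
  rw [hkeyBA]
  refine (PySem.List.sorted_eq_of_perm_of_pairwise_lt _ _ pvKeyA ?_ hpairLA).symm
  exact (PySem.List.sorted_perm _ pvKeyA false).trans hperm

-- ===== VERDICT (by name: the statement is the Claim_ definition above) =====
theorem transitive_closure_clusters_spec : Claim_equal_transitive_closure_clusters := by
  intro pairs_strong n _ hpre
  unfold Spec_transitive_closure_clusters
  exact pvMain pairs_strong n hpre
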